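-- pv_equiv track=rewrite | github.com/sudokatie/sonnet | src/sonnet/rhymes.py | get_rhyme_groups
-- ===== SOURCE A (Python) =====
-- def get_rhyme_groups(scheme: str) -> dict:
--     """
--     Parse a rhyme scheme string into groups.
--
--     E.g., "ABAB" -> {"A": [0, 2], "B": [1, 3]}
--     """
--     groups = {}
--     for i, letter in enumerate(scheme.upper()):
--         if letter.isalpha():
--             if letter not in groups:
--                 groups[letter] = []
--             groups[letter].append(i)
--     return groups
-- ===== SOURCE B (Python) =====
-- def get_rhyme_groups(scheme: str) -> dict:
--     """
--     Parse a rhyme scheme string into groups.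
--
--     E.g., "ABAB" -> {"A": [0, 2], "B": [1, 3]}
--     """
--     up = scheme.upper()
--     letters = list(dict.fromkeys(c for c in up if c.isalpha()))
--     return {c: [i for i, ch in enumerate(up) if ch == c] for c in letters}
-- ===== Notes on version B (the rewrite author's own statement) =====
-- stated objective: alternative
-- what changed: Replaces the incremental dict-building loop (membership test, seed with [], append per character) with a two-phase shape: first compute the distinct rhyme letters in first-appearance order via dict.fromkeys, then build the whole result in one dict comprehension that collects each letter's index list by scanning enumerate(up).
import Mathlib
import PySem

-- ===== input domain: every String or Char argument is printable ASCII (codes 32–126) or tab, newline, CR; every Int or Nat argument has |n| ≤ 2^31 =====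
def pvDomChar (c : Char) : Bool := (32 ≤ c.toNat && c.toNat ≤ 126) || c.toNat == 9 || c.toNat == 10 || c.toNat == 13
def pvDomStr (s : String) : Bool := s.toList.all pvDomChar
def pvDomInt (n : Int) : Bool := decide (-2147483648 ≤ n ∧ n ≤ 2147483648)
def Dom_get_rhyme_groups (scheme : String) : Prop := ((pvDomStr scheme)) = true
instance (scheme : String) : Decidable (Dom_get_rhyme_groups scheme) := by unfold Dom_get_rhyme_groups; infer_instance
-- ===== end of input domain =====

-- B replaces A's incremental dict-building loop with a two-phase shape (dedup the letters, then one
-- dict comprehension collecting each letter's indices); alternative decomposition, not claimed faster.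


-- ===== PORT A =====
-- groups = {}; for i, letter in enumerate(scheme.upper()): if letter.isalpha():
--   if letter not in groups: groups[letter] = []; groups[letter].append(i); return groups
def get_rhyme_groups (scheme : String) : List (String × List Int) :=
  let groups :=
    (PySem.List.enumerate (PySem.Str.upper scheme).toList 0).foldl
      (fun d p =>
        if PySem.Chars.isalpha p.2 then
          let d' := if d.contains (String.ofList [p.2]) then d
                    else d.insert (String.ofList [p.2]) ([] : List Int)
          d'.modify (String.ofList [p.2]) [] (· ++ [p.1])
        else d)
      PySem.Dict.empty
  groups.items

-- ===== PORT B =====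
-- up = scheme.upper(); letters = list(dict.fromkeys(c for c in up if c.isalpha()));
-- return {c: [i for i, ch in enumerate(up) if ch == c] for c in letters}
def get_rhyme_groups_alt (scheme : String) : List (String × List Int) :=
  let up := (PySem.Str.upper scheme).toList
  let letters := PySem.List.dedup (up.filter PySem.Chars.isalpha)
  letters.map (fun c =>
    (String.ofList [c],
     ((PySem.List.enumerate up 0).filter (fun p => p.2 == c)).map (·.1)))

-- ===== PRECONDITION & SPEC =====
def Spec_get_rhyme_groups (scheme : String) (out : List (String × List Int)) : Prop := out = get_rhyme_groups_alt scheme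
instance (scheme : String) (out : List (String × List Int)) : Decidable (Spec_get_rhyme_groups scheme out) := by unfold Spec_get_rhyme_groups; infer_instance

-- ===== CLAIM (what is proved, stated in full; the proofs are below) =====
def Claim_equal_get_rhyme_groups : Prop := ∀ (scheme : String), Dom_get_rhyme_groups scheme → Spec_get_rhyme_groups scheme (get_rhyme_groups scheme)

-- ===== LEMMAS AND PROOFS =====
theorem pv_step_eq (d : PySem.Dict String (List Int)) (k : String) (i : Int) :
    (if d.contains k then d else d.insert k ([] : List Int)).modify k [] (· ++ [i])
      = d.modify k [] (· ++ [i]) := by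
  by_cases h : d.contains k = true
  · simp [h]
  · simp only [h, if_neg, Bool.not_eq_true]
    simp [PySem.Dict.modify, PySem.Dict.getD_insert_self, PySem.Dict.insert_insert_self,
      PySem.Dict.getD_of_not_contains _ _ (by simpa using h)]

theorem pv_foldl_ite_filter {α β : Type} (c : α → Bool) (f : β → α → β) :
    ∀ (l : List α) (d : β),
      l.foldl (fun d x => if c x then f d x else d) d = (l.filter c).foldl f d := by
  intro l
  induction l with
  | nil => intro d; rfl
  | cons x xs ih =>
    intro d
    by_cases h : c x = true <;> simp [h, ih]

theorem pv_add_map {α β : Type} [DecidableEq α] [DecidableEq β] (f : α → β)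
    (hf : Function.Injective f) (s : List α) (x : α) :
    PySem.Set.add (s.map f) (f x) = (PySem.Set.add s x).map f := by
  simp only [PySem.Set.add, PySem.Set.contains]
  by_cases h : x ∈ s
  · simp [h, List.mem_map.mpr ⟨x, h, rfl⟩]
  · have : f x ∉ s.map f := by
      intro hm
      rcases List.mem_map.mp hm with ⟨y, hy, hxy⟩
      exact h (hf hxy ▸ hy)
    simp [h, this]

theorem pv_dedup_map {α β : Type} [DecidableEq α] [DecidableEq β] (f : α → β)
    (hf : Function.Injective f) (xs : List α) :
    PySem.List.dedup (xs.map f) = (PySem.List.dedup xs).map f := by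
  have main : ∀ (xs : List α) (s : List α),
      (xs.map f).foldl PySem.Set.add (s.map f) = (xs.foldl PySem.Set.add s).map f := by
    intro xs
    induction xs with
    | nil => intro s; rfl
    | cons x t ih =>
      intro s
      simp only [List.map_cons, List.foldl_cons, pv_add_map f hf]
      exact ih _
  simpa [PySem.List.dedup_eq_ofList, PySem.Set.ofList_eq_foldl] using main xs []

theorem get_rhyme_groups_main (u : List Char) :
    ((PySem.List.enumerate u 0).foldl
        (fun d p =>
          if PySem.Chars.isalpha p.2 then
            let d' := if d.contains (String.ofList [p.2]) then d
                      else d.insert (String.ofList [p.2]) ([] : List Int)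
            d'.modify (String.ofList [p.2]) [] (· ++ [p.1])
          else d)
        PySem.Dict.empty).items
    = (PySem.List.dedup (u.filter PySem.Chars.isalpha)).map (fun c =>
        (String.ofList [c],
         ((PySem.List.enumerate u 0).filter (fun p => p.2 == c)).map (·.1))) := by
  set l := PySem.List.enumerate u 0 with hl
  set l' := l.filter (fun p => PySem.Chars.isalpha p.2) with hl'
  set g : Char → String := fun c => String.ofList [c] with hg
  have hginj : Function.Injective g := by
    intro a b hab
    simpa [hg, String.ofList_inj] using hab
  set m := l'.map (fun p => (g p.2, p.1)) with hm
  set D := m.foldl (fun d q => d.modify q.1 [] (· ++ [q.2])) PySem.Dict.empty with hD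
  -- the A fold is D
  have hfold : (l.foldl
        (fun d p =>
          if PySem.Chars.isalpha p.2 then
            let d' := if d.contains (String.ofList [p.2]) then d
                      else d.insert (String.ofList [p.2]) ([] : List Int)
            d'.modify (String.ofList [p.2]) [] (· ++ [p.1])
          else d)
        PySem.Dict.empty) = D := by
    simp only [pv_step_eq]
    exact (pv_foldl_ite_filter (fun p : Int × Char => PySem.Chars.isalpha p.2)
      (fun d (p : Int × Char) => PySem.Dict.modify d (g p.2) [] (· ++ [p.1]))
      l PySem.Dict.empty).trans (by rw [hD, hm, List.foldl_map])
  rw [hfold]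
  -- keys of D
  have hsnd : l'.map (·.2) = u.filter PySem.Chars.isalpha := by
    rw [hl', show (fun p : Int × Char => PySem.Chars.isalpha p.2)
        = (PySem.Chars.isalpha ∘ (·.2)) from rfl, ← List.filter_map, hl,
      PySem.List.map_snd_enumerate]
  have hkeys : D.keys = (PySem.List.dedup (u.filter PySem.Chars.isalpha)).map g := by
    rw [hD, PySem.Dict.keys_foldl_modify_key m (fun q => q.1) [] (fun _ q v => v ++ [q.2])]
    have h1 : m.map (fun q => q.1) = ((u.filter PySem.Chars.isalpha).map g) := by
      rw [hm, List.map_map, ← hsnd, List.map_map]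
      rfl
    rw [h1]
    have h2 : PySem.Set.update (PySem.Dict.empty : PySem.Dict String (List Int)).keys
        ((u.filter PySem.Chars.isalpha).map g)
        = PySem.Set.ofList ((u.filter PySem.Chars.isalpha).map g) := by
      simp [PySem.Dict.keys_empty, PySem.Set.update, PySem.Set.ofList_eq_foldl]
    rw [h2, ← PySem.List.dedup_eq_ofList, pv_dedup_map g hginj]
  have hnd : D.keys.Nodup := by
    rw [hD]
    exact PySem.Dict.nodup_keys_foldl_modify_key m (fun q => q.1) [] (fun _ q v => v ++ [q.2])
      _ PySem.Dict.nodup_keys_empty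
  rw [PySem.Dict.items_eq_map_keys D hnd [], hkeys, List.map_map]
  apply List.map_congr_left
  intro c hc
  have hca : PySem.Chars.isalpha c = true :=
    (List.mem_filter.mp ((PySem.List.mem_dedup _ c).mp hc)).2
  show (g c, D.getD (g c) []) = (g c, (l.filter (fun p => p.2 == c)).map (·.1))
  have hval : D.getD (g c) [] = (m.filter (fun q => q.1 == g c)).map (·.2) := by
    rw [hD, PySem.Dict.getD_foldl_modify_append m PySem.Dict.empty (g c)]
    simp [PySem.Dict.getD_empty]
  have hpred : ∀ p : Int × Char,
      (((fun q : String × Int => q.1 == g c) ∘ fun p : Int × Char => (g p.2, p.1)) p)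
        = (p.2 == c) := by
    intro p
    by_cases h : p.2 = c <;> simp [h, hg, String.ofList_inj]
  have hconj : ∀ p ∈ l, ((p.2 == c) && PySem.Chars.isalpha p.2) = (p.2 == c) := by
    intro p _
    by_cases h : p.2 = c
    · simp [h, hca]
    · simp [h]
  congr 1
  rw [hval, hm, List.filter_map, List.map_map,
    List.filter_congr (fun p _ => hpred p), hl', List.filter_filter,
    List.filter_congr hconj]
  rfl

-- ===== VERDICT (by name: the statement is the Claim_ definition above) =====
theorem get_rhyme_groups_spec : Claim_equal_get_rhyme_groups := by
  intro scheme _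
  unfold Spec_get_rhyme_groups get_rhyme_groups get_rhyme_groups_alt
  exact get_rhyme_groups_main (PySem.Str.upper scheme).toList
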